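-- pv_equiv track=rewrite | github.com/belkaz/jap | Ca.py | Negatives
-- ===== SOURCE A (Python) =====
-- def Negatives ( arr ) :
--     rezArr = []
--     indArr = []
--     sum0 = 0
--     for i in range ( len ( arr ) ):
--         if arr[i] == 1:
--             if len ( arr[sum0 : i] ) > 0:
--                 rezArr.append ( len( arr[sum0 : i]) )
--                 indArr.append ( sum0 )
--             sum0 = i + 1
--     if len ( rezArr ) > 0:
--         rezArr.append ( len( arr[sum0 : len ( arr )]) )
--         indArr.append ( sum0 )
--     return [indArr , rezArr]
-- ===== SOURCE B (Python) =====
-- def _gaps(arr, base):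
--     # recursively split at the first 1: (interior (start, length) pairs, start of the tail)
--     if 1 in arr:
--         k = arr.index(1)
--         pairs, tail = _gaps(arr[k + 1:], base + k + 1)
--         return (([(base, k)] if k > 0 else []) + pairs, tail)
--     return ([], base)
--
-- def Negatives(arr):
--     pairs, tail = _gaps(arr, 0)
--     if pairs:
--         pairs = pairs + [(tail, len(arr) - tail)]
--     return [[s for s, _ in pairs], [l for _, l in pairs]]
-- ===== Notes on version B (the rewrite author's own statement) =====
-- stated objective: alternative
-- what changed: B replaces A's single indexed loop with running slice tests by a recursive divide: it repeatedly finds the first 1 with index(), recurses on the slice after it to collect the interior (start,length) gap pairs and the tail start, then appends the trailing pair if any gap was found and unzips the pair list into the two result lists.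
import Mathlib
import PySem

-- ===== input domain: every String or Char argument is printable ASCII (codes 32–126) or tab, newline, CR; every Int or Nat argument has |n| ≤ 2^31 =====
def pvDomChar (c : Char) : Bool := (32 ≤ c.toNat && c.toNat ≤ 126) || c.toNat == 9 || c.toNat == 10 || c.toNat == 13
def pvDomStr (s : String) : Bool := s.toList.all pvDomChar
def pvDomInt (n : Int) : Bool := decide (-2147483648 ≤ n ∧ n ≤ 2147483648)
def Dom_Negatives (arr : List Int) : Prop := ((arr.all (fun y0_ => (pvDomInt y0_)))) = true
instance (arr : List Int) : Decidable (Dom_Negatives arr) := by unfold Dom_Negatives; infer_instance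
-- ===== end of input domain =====

-- B recursively splits the list at the first 1 (index + slice) to build the gap pairs,
-- instead of A's single indexed loop with a running boundary (objective: alternative).

-- ===== PORT A =====
def Negatives (arr : List Int) : List (List Int) :=
  -- state: (rezArr, indArr, sum0)
  let st := (PySem.List.pyRange 0 (arr.length : Int) 1).foldl
    (fun (st : List Int × List Int × Int) i =>
      if PySem.List.pyGet? arr i = some 1 then
        if 0 < (PySem.List.slice arr (some st.2.2) (some i)).length then
          (st.1 ++ [((PySem.List.slice arr (some st.2.2) (some i)).length : Int)],
           st.2.1 ++ [st.2.2], i + 1)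
        else (st.1, st.2.1, i + 1)
      else st)
    ([], [], 0)
  if 0 < st.1.length then
    [st.2.1 ++ [st.2.2],
     st.1 ++ [((PySem.List.slice arr (some st.2.2) (some (arr.length : Int))).length : Int)]]
  else [st.2.1, st.1]

-- ===== PORT B =====
-- _gaps: '1 in arr' + 'arr.index(1)' ported together as PySem.List.index? (some k ⟺ 1 ∈ arr)
def pvGaps (arr : List Int) (base : Int) : List (Int × Int) × Int :=
  match h : PySem.List.index? arr 1 with
  | some k =>
      let rest := pvGaps (PySem.List.slice arr (some ((k : Int) + 1)) none) (base + (k : Int) + 1)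
      ((if 0 < (k : Int) then [(base, (k : Int))] else []) ++ rest.1, rest.2)
  | none => ([], base)
termination_by arr.length
decreasing_by
  obtain ⟨hk, _, _⟩ := PySem.List.getElem_of_index?_eq_some h
  have : (PySem.List.slice arr (some ((k : Int) + 1)) none) = arr.drop (k + 1) := by
    have := PySem.List.slice_from_natCast arr (k + 1)
    push_cast at this
    simpa using this
  rw [this]
  simp
  omega

def Negatives_alt (arr : List Int) : List (List Int) :=
  let pt := pvGaps arr 0
  let pairs := if pt.1 ≠ [] then pt.1 ++ [(pt.2, (arr.length : Int) - pt.2)] else pt.1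
  [pairs.map Prod.fst, pairs.map Prod.snd]

-- ===== PRECONDITION & SPEC =====
def Spec_Negatives (arr : List Int) (out : List (List Int)) : Prop := out = Negatives_alt arr
instance (arr : List Int) (out : List (List Int)) : Decidable (Spec_Negatives arr out) := by unfold Spec_Negatives; infer_instance

-- ===== CLAIM (what is proved, stated in full; the proofs are below) =====
def Claim_equal_Negatives : Prop := ∀ (arr : List Int), Dom_Negatives arr → Spec_Negatives arr (Negatives arr)

-- ===== LEMMAS AND PROOFS =====

-- segment table of starts/lengths determined by the 1-positions, and the final cursor
def mkSegs : Int → List Int → List (Int × Int)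
  | _, [] => []
  | s, p :: ps => (s, p - s) :: mkSegs (p + 1) ps

def endPrev : Int → List Int → Int
  | s, [] => s
  | _, p :: ps => endPrev (p + 1) ps

-- positions (absolute, offset s) of the elements equal to 1
def onesFrom (s : Int) (arr : List Int) : List Int :=
  ((PySem.List.enumerate arr s).filter (fun p => p.2 == 1)).map Prod.fst

-- abstract per-one step of A's loop (after slice lengths are resolved)
def hstep (st : List Int × List Int × Int) (p : Int) : List Int × List Int × Int :=
  if st.2.2 < p then (st.1 ++ [p - st.2.2], st.2.1 ++ [st.2.2], p + 1)
  else (st.1, st.2.1, p + 1)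

theorem hfold (ones : List Int) : ∀ (rez ind : List Int) (s : Int),
    ones.foldl hstep (rez, ind, s)
      = (rez ++ ((mkSegs s ones).filter (fun sl => decide (0 < sl.2))).map Prod.snd,
         ind ++ ((mkSegs s ones).filter (fun sl => decide (0 < sl.2))).map Prod.fst,
         endPrev s ones) := by
  induction ones with
  | nil => intro rez ind s; simp [mkSegs, endPrev]
  | cons p ps ih =>
    intro rez ind s
    by_cases h : s < p
    · have h' : (0 : Int) < p - s := by omega
      simp [mkSegs, endPrev, List.foldl_cons, hstep, h, ih]
    · simp [mkSegs, endPrev, List.foldl_cons, hstep, h, ih]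

-- g-fold over (index, value) pairs reduces to the h-fold over the positions of the 1s
theorem gfold (l : List (Int × Int)) :
    ∀ (st : List Int × List Int × Int),
    l.foldl (fun st iv => if iv.2 = 1 then hstep st iv.1 else st) st
      = ((l.filter (fun p => p.2 == 1)).map Prod.fst).foldl hstep st := by
  induction l with
  | nil => intro st; simp
  | cons iv rest ih =>
    intro st
    by_cases h : iv.2 = 1 <;> simp [List.foldl_cons, h, ih]

theorem mem_enumerate_bounds {α : Type} (l : List α) : ∀ (s : Int) (x : Int × α),
    x ∈ PySem.List.enumerate l s → s ≤ x.1 ∧ x.1 < s + l.length := by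
  induction l with
  | nil => intro s x hx; simp [PySem.List.enumerate_nil] at hx
  | cons a as ih =>
    intro s x hx
    rw [PySem.List.enumerate_cons] at hx
    rcases List.mem_cons.mp hx with h | h
    · subst h; simp
    · have := ih (s + 1) x h
      simp only [List.length_cons]
      omega

theorem endPrev_bounds (ones : List Int) (n : Int) : ∀ (s : Int),
    0 ≤ s → s ≤ n → (∀ p ∈ ones, 0 ≤ p ∧ p < n) →
    0 ≤ endPrev s ones ∧ endPrev s ones ≤ n := by
  induction ones with
  | nil => intro s h0 h1 _; simpa [endPrev] using ⟨h0, h1⟩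
  | cons p ps ih =>
    intro s h0 h1 hb
    have hp := hb p (List.mem_cons_self)
    exact ih (p + 1) (by omega) (by omega) (fun q hq => hb q (List.mem_cons_of_mem _ hq))

theorem clamp_eq_of_bounds (n : Nat) (s : Int) (h0 : 0 ≤ s) (h1 : s ≤ (n : Int)) :
    ((PySem.List.clampIdx n s : Nat) : Int) = s := by
  have hs : s = ((s.toNat : Nat) : Int) := by omega
  rw [hs, PySem.List.clampIdx_natCast]
  omega

theorem slice_len_eq (arr : List Int) (s i : Int) (h0 : 0 ≤ s) (h1 : s ≤ i)
    (h2 : i ≤ (arr.length : Int)) :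
    ((PySem.List.slice arr (some s) (some i)).length : Int) = i - s := by
  rw [PySem.List.length_slice]
  have hi := clamp_eq_of_bounds arr.length i (by omega) h2
  have hs := clamp_eq_of_bounds arr.length s h0 (by omega)
  omega

-- A's range loop equals the g-fold over the enumeration of the remaining suffix
theorem A_loop_eq (arr : List Int) : ∀ (m k : Nat), arr.length - k = m → k ≤ arr.length →
    ∀ (st : List Int × List Int × Int), 0 ≤ st.2.2 → st.2.2 ≤ (k : Int) →
    (PySem.List.pyRange (k : Int) (arr.length : Int) 1).foldl
      (fun (st : List Int × List Int × Int) i =>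
        if PySem.List.pyGet? arr i = some 1 then
          if 0 < (PySem.List.slice arr (some st.2.2) (some i)).length then
            (st.1 ++ [((PySem.List.slice arr (some st.2.2) (some i)).length : Int)],
             st.2.1 ++ [st.2.2], i + 1)
          else (st.1, st.2.1, i + 1)
        else st) st
    = (PySem.List.enumerate (arr.drop k) (k : Int)).foldl
        (fun st iv => if iv.2 = 1 then hstep st iv.1 else st) st := by
  intro m
  induction m with
  | zero =>
    intro k hm hk st _ _
    have hkn : k = arr.length := by omega
    subst hkn
    rw [PySem.List.pyRange_one_eq_nil (by omega)]
    simp [PySem.List.enumerate_nil]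
  | succ m ih =>
    intro k hm hk st h0 h1
    have hklt : k < arr.length := by omega
    rw [PySem.List.pyRange_one_cons (by exact_mod_cast hklt)]
    rw [List.drop_eq_getElem_cons hklt, PySem.List.enumerate_cons]
    rw [List.foldl_cons, List.foldl_cons]
    have hget : PySem.List.pyGet? arr (k : Int) = some arr[k] :=
      PySem.List.pyGet?_ofNat arr k hklt
    have hstep_eq :
        (if PySem.List.pyGet? arr (k : Int) = some 1 then
          if 0 < (PySem.List.slice arr (some st.2.2) (some (k : Int))).length then
            (st.1 ++ [((PySem.List.slice arr (some st.2.2) (some (k : Int))).length : Int)],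
             st.2.1 ++ [st.2.2], (k : Int) + 1)
          else (st.1, st.2.1, (k : Int) + 1)
        else st)
        = (if (((k : Int)), arr[k]).2 = 1 then hstep st ((((k : Int)), arr[k])).1 else st) := by
      rw [hget]
      by_cases hv : arr[k] = (1 : Int)
      · have hlen : ((PySem.List.slice arr (some st.2.2) (some (k : Int))).length : Int)
            = (k : Int) - st.2.2 := slice_len_eq arr st.2.2 (k : Int) h0 h1 (by exact_mod_cast hklt.le)
        by_cases hc : st.2.2 < (k : Int)
        · have : 0 < (PySem.List.slice arr (some st.2.2) (some (k : Int))).length := by omega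
          simp [hv, hstep, hc, this, hlen]
        · have : ¬ 0 < (PySem.List.slice arr (some st.2.2) (some (k : Int))).length := by omega
          simp [hv, hstep, hc, this]
      · simp [hv]
    rw [hstep_eq]
    have hnext := ih (k + 1) (by omega) (by omega)
      ((if (((k : Int)), arr[k]).2 = 1 then hstep st ((((k : Int)), arr[k])).1 else st))
    have harg : ∀ st' : List Int × List Int × Int, 0 ≤ st'.2.2 → st'.2.2 ≤ (k : Int) →
        0 ≤ (if ((((k : Int))), arr[k]).2 = 1 then hstep st' ((((k : Int)), arr[k])).1 else st').2.2 ∧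
        (if ((((k : Int))), arr[k]).2 = 1 then hstep st' ((((k : Int)), arr[k])).1 else st').2.2 ≤ ((k + 1 : Nat) : Int) := by
      intro st' ha hb
      by_cases hv : arr[k] = (1 : Int) <;> by_cases hc : st'.2.2 < (k : Int) <;>
        simp [hv, hstep, hc] <;> push_cast <;> omega
    have hb := harg st h0 h1
    have := hnext hb.1 (by push_cast at hb ⊢; exact hb.2)
    push_cast at this
    exact this

theorem onesFrom_of_not_mem (arr : List Int) (s : Int) (h : (1 : Int) ∉ arr) :
    onesFrom s arr = [] := by
  unfold onesFrom
  rw [List.filter_eq_nil_iff.mpr, List.map_nil]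
  intro p hp
  have : p.2 ∈ arr := by
    have := List.mem_map_of_mem (f := Prod.snd) hp
    rwa [PySem.List.map_snd_enumerate] at this
  simp only [beq_iff_eq]
  intro he; exact h (he ▸ this)

-- splitting onesFrom at the first 1
theorem onesFrom_split (pre suf : List Int) (s : Int) (hpre : (1 : Int) ∉ pre) :
    onesFrom s (pre ++ 1 :: suf)
      = (s + pre.length) :: onesFrom (s + pre.length + 1) suf := by
  unfold onesFrom
  rw [PySem.List.enumerate_append, List.filter_append, PySem.List.enumerate_cons]
  have hnil : (PySem.List.enumerate pre s).filter (fun p => p.2 == 1) = [] := by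
    rw [List.filter_eq_nil_iff]
    intro p hp
    have : p.2 ∈ pre := by
      have := List.mem_map_of_mem (f := Prod.snd) hp
      rwa [PySem.List.map_snd_enumerate] at this
    simp only [beq_iff_eq]
    intro he; exact hpre (he ▸ this)
  simp [hnil]

-- B's recursion computes the filtered segment table and the final cursor
theorem gaps_eq (n : Nat) : ∀ (arr : List Int) (base : Int), arr.length = n →
    pvGaps arr base
      = (((mkSegs base (onesFrom base arr)).filter (fun sl => decide (0 < sl.2))),
         endPrev base (onesFrom base arr)) := by
  induction n using Nat.strong_induction_on with
  | _ n ih =>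
    intro arr base hn
    rw [pvGaps]
    split
    next k h =>
      obtain ⟨pre, suf, harr, hlen, hnm⟩ := (PySem.List.index?_eq_some_iff arr 1 k).mp h
      have hslice : PySem.List.slice arr (some ((k : Int) + 1)) none = suf := by
        have := PySem.List.slice_from_natCast arr (k + 1)
        push_cast at this
        rw [this, harr, ← hlen]
        simp
      have hsuflen : suf.length < n := by
        subst harr hn; simp; omega
      have hones : onesFrom base arr = (base + k) :: onesFrom (base + k + 1) suf := by
        rw [harr, ← hlen]
        exact onesFrom_split pre suf base hnm
      rw [hslice, ih suf.length hsuflen suf (base + (k : Int) + 1) rfl]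
      rw [hones]
      simp only [mkSegs, endPrev]
      have hk : base + (k : Int) - base = (k : Int) := by ring
      rw [hk]
      by_cases hkpos : 0 < k
      · simp [hkpos]
      · simp [hkpos]
    next h =>
      have h1 : (1 : Int) ∉ arr := (PySem.List.index?_eq_none_iff arr 1).mp h
      simp [onesFrom_of_not_mem arr base h1, mkSegs, endPrev]

theorem Negatives_eq (arr : List Int) : Negatives arr = Negatives_alt arr := by
  have h0 := A_loop_eq arr (arr.length) 0 (by omega) (by omega) ([], [], 0)
    (by simp) (by simp)
  simp only [Nat.cast_zero, List.drop_zero] at h0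
  simp only [Negatives, Negatives_alt]
  rw [h0, gfold, hfold, gaps_eq arr.length arr 0 rfl]
  have honesdef : List.map Prod.fst (List.filter (fun p => p.2 == 1) (PySem.List.enumerate arr 0))
      = onesFrom 0 arr := rfl
  rw [honesdef]
  set ones := onesFrom 0 arr with hones
  have hbounds : ∀ p ∈ ones, 0 ≤ p ∧ p < (arr.length : Int) := by
    intro p hp
    rw [hones] at hp
    rcases List.mem_map.mp hp with ⟨x, hx, hpx⟩
    have hx' := List.mem_of_mem_filter hx
    have := mem_enumerate_bounds arr 0 x hx'
    omega
  have hend := endPrev_bounds ones (arr.length : Int) 0 (le_refl 0) (by omega) hbounds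
  have hslice : ((PySem.List.slice arr (some (endPrev 0 ones)) (some (arr.length : Int))).length : Int)
      = (arr.length : Int) - endPrev 0 ones :=
    slice_len_eq arr (endPrev 0 ones) (arr.length : Int) hend.1 hend.2 (le_refl _)
  set fs := (mkSegs 0 ones).filter (fun sl => decide (0 < sl.2)) with hfs
  by_cases hne : fs = []
  · simp [hne]
  · have hlen : 0 < (fs.map (Prod.snd (α := Int))).length := by
      simp [List.length_pos_iff_ne_nil, hne]
    simp only [List.nil_append, hlen, if_pos, ite_not, hslice]
    simp [hne]

-- ===== VERDICT (by name: the statement is the Claim_ definition above) =====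
theorem Negatives_spec : Claim_equal_Negatives := by
  intro arr _
  unfold Spec_Negatives
  exact Negatives_eq arr
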